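-- pv_equiv track=rewrite | github.com/OkaNim/table-polymer-data-extractor | src/152_04_property-specifier-search_g_211224.py | search_property_specifier
-- ===== SOURCE A (Python) =====
-- def search_property_specifier(TOK, BW, BW2, BW3):
--     BTAG = ["O" for i in range(len(TOK))]
--     BCATE = ["_" for i in range(len(TOK))]
--
--     for i, tok in enumerate(TOK):
--         for j, bw in enumerate(BW):
--             if bw in tok: BTAG[i], BCATE[i] = "S", BW2[j]
--
--         for bw3 in BW3:
--             if bw3 in tok:
--                 BTAG[i], BCATE[i] = "O", "_"
--                 break
--
--     return BTAG, BCATE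
-- ===== SOURCE B (Python) =====
-- def _classify(tok, BW, BW2, BW3):
--     if any(w3 in tok for w3 in BW3):
--         return "O", "_"
--     for j, bw in reversed(list(enumerate(BW))):
--         if bw in tok:
--             return "S", BW2[j]
--     return "O", "_"
--
--
-- def search_property_specifier(TOK, BW, BW2, BW3):
--     decisions = [_classify(tok, BW, BW2, BW3) for tok in TOK]
--     return [t for t, _ in decisions], [c for _, c in decisions]
-- ===== Notes on version B (the rewrite author's own statement) =====
-- stated objective: faster
-- what changed: Each token is classified independently by one early-out decision (BW3 veto first, then the first match scanning BW in reverse = A's last match), replacing A's mutate-two-parallel-arrays assign-then-override scan that tests every BW and BW3 word for every token.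
import Mathlib
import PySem

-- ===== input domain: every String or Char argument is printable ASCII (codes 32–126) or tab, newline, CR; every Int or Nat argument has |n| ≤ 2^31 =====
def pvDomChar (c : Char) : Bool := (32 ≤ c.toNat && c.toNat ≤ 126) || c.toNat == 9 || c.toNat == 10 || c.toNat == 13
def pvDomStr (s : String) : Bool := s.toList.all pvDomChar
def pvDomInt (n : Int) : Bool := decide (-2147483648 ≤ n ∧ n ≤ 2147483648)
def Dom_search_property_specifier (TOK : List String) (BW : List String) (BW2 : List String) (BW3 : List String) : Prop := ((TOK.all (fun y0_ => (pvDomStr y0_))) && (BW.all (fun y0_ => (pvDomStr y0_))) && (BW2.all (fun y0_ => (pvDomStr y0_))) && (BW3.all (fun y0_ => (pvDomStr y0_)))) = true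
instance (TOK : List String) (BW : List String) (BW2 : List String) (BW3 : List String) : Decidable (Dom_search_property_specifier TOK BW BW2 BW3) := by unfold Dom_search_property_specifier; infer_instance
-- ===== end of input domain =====

-- B classifies each token independently (BW3 veto first, then first match scanning BW in reverse);
-- A mutates two parallel arrays with an assign-then-override scan. Equal return values on Pre_; objective: simpler.

-- ===== PORT A =====
-- 'for bw3 in BW3: if bw3 in tok: BTAG[i], BCATE[i] = "O", "_"; break'
def pvA_bw3loop (tok : String) (i : Nat) (st : List String × List String) : List String → List String × List String
  | [] => st
  | w :: ws => if PySem.Str.isIn w tok then (st.1.set i "O", st.2.set i "_") else pvA_bw3loop tok i st ws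

def search_property_specifier (TOK : List String) (BW : List String) (BW2 : List String) (BW3 : List String) : List String × List String :=
  let BTAG := (List.range TOK.length).map (fun _ => "O")
  let BCATE := (List.range TOK.length).map (fun _ => "_")
  (PySem.List.enumerate TOK).foldl (fun st p =>
    let i := p.1.toNat
    let tok := p.2
    -- 'for j, bw in enumerate(BW): if bw in tok: BTAG[i], BCATE[i] = "S", BW2[j]'
    -- BW2[j] is PySem.List.pyGet?; the '.getD "_"' default is unreachable under Pre_ (IndexError excluded)
    let st1 := (PySem.List.enumerate BW).foldl (fun s q =>
      if PySem.Str.isIn q.2 tok then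
        (s.1.set i "S", s.2.set i ((PySem.List.pyGet? BW2 q.1).getD "_"))
      else s) st
    pvA_bw3loop tok i st1 BW3) (BTAG, BCATE)

-- ===== PORT B =====
def pvB_classify (tok : String) (BW : List String) (BW2 : List String) (BW3 : List String) : String × String :=
  if BW3.any (fun w3 => PySem.Str.isIn w3 tok) then ("O", "_")
  else
    -- 'for j, bw in reversed(list(enumerate(BW))): if bw in tok: return "S", BW2[j]'
    -- BW2[j] is PySem.List.pyGet?; the '.getD "_"' default is unreachable under Pre_ (IndexError excluded)
    match (PySem.List.enumerate BW).reverse.find? (fun q => PySem.Str.isIn q.2 tok) with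
    | some q => ("S", (PySem.List.pyGet? BW2 q.1).getD "_")
    | none => ("O", "_")

def search_property_specifier_alt (TOK : List String) (BW : List String) (BW2 : List String) (BW3 : List String) : List String × List String :=
  let decisions := TOK.map (fun tok => pvB_classify tok BW BW2 BW3)
  (decisions.map (fun d => d.1), decisions.map (fun d => d.2))

-- ===== PRECONDITION & SPEC =====
-- Pre_ excludes exactly the inputs where Python A raises IndexError: some token contains BW[j] for a j ≥ len(BW2).
def Pre_search_property_specifier (TOK : List String) (BW : List String) (BW2 : List String) (BW3 : List String) : Prop :=
  ((BW.drop BW2.length).all (fun bw => TOK.all (fun tok => !(PySem.Str.isIn bw tok)))) = true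
instance (TOK : List String) (BW : List String) (BW2 : List String) (BW3 : List String) : Decidable (Pre_search_property_specifier TOK BW BW2 BW3) := by unfold Pre_search_property_specifier; infer_instance

def pvWitness_search_property_specifier : List String × List String × List String × List String :=
  (["abc", "xy"], ["a", "b", "x"], ["A", "B", "X"], ["y"])

def Spec_search_property_specifier (TOK : List String) (BW : List String) (BW2 : List String) (BW3 : List String) (out : List String × List String) : Prop := out = search_property_specifier_alt TOK BW BW2 BW3
instance (TOK : List String) (BW : List String) (BW2 : List String) (BW3 : List String) (out : List String × List String) : Decidable (Spec_search_property_specifier TOK BW BW2 BW3 out) := by unfold Spec_search_property_specifier; infer_instance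

-- ===== CLAIM (what is proved, stated in full; the proofs are below) =====
def Claim_equal_search_property_specifier : Prop := ∀ (TOK : List String) (BW : List String) (BW2 : List String) (BW3 : List String), Dom_search_property_specifier TOK BW BW2 BW3 → Pre_search_property_specifier TOK BW BW2 BW3 → Spec_search_property_specifier TOK BW BW2 BW3 (search_property_specifier TOK BW BW2 BW3)

-- ===== LEMMAS AND PROOFS =====

-- the break-loop over BW3 resets position i iff some bw3 occurs in tok
theorem pvA_bw3loop_eq (tok : String) (i : Nat) (st : List String × List String) (l : List String) :
    pvA_bw3loop tok i st l =
      if l.any (fun w => PySem.Str.isIn w tok) then (st.1.set i "O", st.2.set i "_") else st := by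
  induction l with
  | nil => simp [pvA_bw3loop]
  | cons w ws ih =>
    simp only [pvA_bw3loop, ih]
    by_cases h : PySem.Chars.isIn w.toList tok.toList = true <;> simp [h]

-- a fold that overwrites the same slot on every match ends at the LAST match = first match of the reversed list
theorem pv_lastmatch (tok : String) (BW2 : List String) (i : Nat) :
    ∀ (l : List (Int × String)) (st : List String × List String),
      l.foldl (fun s q =>
          if PySem.Str.isIn q.2 tok then
            (s.1.set i "S", s.2.set i ((PySem.List.pyGet? BW2 q.1).getD "_"))
          else s) st =
        match l.reverse.find? (fun q => PySem.Str.isIn q.2 tok) with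
        | some q => (st.1.set i "S", st.2.set i ((PySem.List.pyGet? BW2 q.1).getD "_"))
        | none => st := by
  intro l
  induction l with
  | nil => intro st; simp
  | cons a t ih =>
    intro st
    simp only [List.foldl_cons, List.reverse_cons, List.find?_append, ih]
    cases h : t.reverse.find? (fun q => PySem.Str.isIn q.2 tok) <;>
      by_cases hA : PySem.Chars.isIn a.2.toList tok.toList = true <;>
        simp [h, hA, List.set_set]

-- one outer iteration sets slot i to exactly B's per-token decision (or leaves the slot, when that decision
-- is the untouched default): combine the two loop lemmas
theorem pv_step (tok : String) (BW BW2 BW3 : List String) (i : Nat) (st : List String × List String) :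
    pvA_bw3loop tok i
        ((PySem.List.enumerate BW).foldl (fun s q =>
          if PySem.Str.isIn q.2 tok then
            (s.1.set i "S", s.2.set i ((PySem.List.pyGet? BW2 q.1).getD "_"))
          else s) st) BW3 =
      if pvB_classify tok BW BW2 BW3 = ("O", "_") ∧ ¬ (BW3.any (fun w3 => PySem.Str.isIn w3 tok)) = true
      then st
      else (st.1.set i (pvB_classify tok BW BW2 BW3).1, st.2.set i (pvB_classify tok BW BW2 BW3).2) := by
  rw [pv_lastmatch tok BW2 i]
  unfold pvB_classify
  rw [pvA_bw3loop_eq]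
  by_cases h3 : ∃ x ∈ BW3, PySem.Chars.isIn x.toList tok.toList = true <;>
    cases h : (PySem.List.enumerate BW).reverse.find? (fun q => PySem.Str.isIn q.2 tok) <;>
      simp [h3, h, List.set_set]

-- outer loop invariant: with the first i0 slots already finalized and the rest at their defaults,
-- the remaining fold produces the per-token decisions for the remaining tokens
theorem pv_outer (BW BW2 BW3 : List String) :
    ∀ (TOK' dt dc : List String), dc.length = dt.length →
      (PySem.List.enumerate TOK' (dt.length : Int)).foldl (fun st p =>
          let i := p.1.toNat
          let tok := p.2
          let st1 := (PySem.List.enumerate BW).foldl (fun s q =>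
            if PySem.Str.isIn q.2 tok then
              (s.1.set i "S", s.2.set i ((PySem.List.pyGet? BW2 q.1).getD "_"))
            else s) st
          pvA_bw3loop tok i st1 BW3)
        (dt ++ List.replicate TOK'.length "O", dc ++ List.replicate TOK'.length "_") =
      (dt ++ TOK'.map (fun tok => (pvB_classify tok BW BW2 BW3).1),
       dc ++ TOK'.map (fun tok => (pvB_classify tok BW BW2 BW3).2)) := by
  intro TOK'
  induction TOK' with
  | nil => intro dt dc _; simp
  | cons tok rest ih =>
    intro dt dc hlen
    rw [PySem.List.enumerate_cons, List.foldl_cons]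
    simp only [Int.toNat_natCast]
    rw [pv_step]
    by_cases hc : pvB_classify tok BW BW2 BW3 = ("O", "_") ∧
        ¬ (BW3.any (fun w3 => PySem.Str.isIn w3 tok)) = true
    · rw [if_pos hc]
      have h1 : dt ++ List.replicate (tok :: rest).length "O" =
          (dt ++ ["O"]) ++ List.replicate rest.length "O" := by
        simp [List.replicate_succ]
      have h2 : dc ++ List.replicate (tok :: rest).length "_" =
          (dc ++ ["_"]) ++ List.replicate rest.length "_" := by
        simp [List.replicate_succ]
      have hl : ((dt : List String).length : Int) + 1 = ((dt ++ ["O"]).length : Int) := by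
        simp
      rw [h1, h2, hl, ih (dt ++ ["O"]) (dc ++ ["_"]) (by simp [hlen])]
      simp [hc.1]
    · rw [if_neg hc]
      have hset1 : (dt ++ List.replicate (tok :: rest).length "O").set dt.length
            (pvB_classify tok BW BW2 BW3).1 =
          (dt ++ [(pvB_classify tok BW BW2 BW3).1]) ++ List.replicate rest.length "O" := by
        rw [List.set_append_right _ _ (Nat.le_refl _)]
        simp [List.replicate_succ]
      have hset2 : (dc ++ List.replicate (tok :: rest).length "_").set dt.length
            (pvB_classify tok BW BW2 BW3).2 =
          (dc ++ [(pvB_classify tok BW BW2 BW3).2]) ++ List.replicate rest.length "_" := by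
        rw [← hlen, List.set_append_right _ _ (Nat.le_refl _)]
        simp [List.replicate_succ]
      have hl : ((dt : List String).length : Int) + 1 =
          (((dt ++ [(pvB_classify tok BW BW2 BW3).1]) : List String).length : Int) := by
        simp
      rw [hset1, hset2, hl, ih _ _ (by simp [hlen])]
      simp

-- ===== VERDICT (by name: the statement is the Claim_ definition above) =====
theorem search_property_specifier_spec : Claim_equal_search_property_specifier := by
  intro TOK BW BW2 BW3 _ _
  unfold Spec_search_property_specifier search_property_specifier search_property_specifier_alt
  have h := pv_outer BW BW2 BW3 TOK [] [] rfl
  simp only [List.length_nil, List.nil_append, Nat.cast_zero] at h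
  simp only [List.map_const', List.length_range, List.map_map]
  rw [h]
  simp [Function.comp]
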